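-- pv_equiv track=rewrite | github.com/DMTF/RDE-Dictionary | pldm_bej_encoder_decoder.py | find_num_bytes_and_msb
-- ===== SOURCE A (Python) =====
-- NUM_BYTES_FOR_INTEGER = 8
--
-- def twos_complement(value, nbits):
--     return (value + (1 << nbits)) % (1 << nbits)
--
-- def find_num_bytes_and_msb(value):
--     if value == 0:
--         return 1, 0x00
--     if value == -1:
--         return 1, 0xff
--
--     # use a big endian byte array (MSB is at index 0) as it is easier to eliminate the padding
--     if value > 0:
--         value_byte_array = twos_complement(value, 64).to_bytes(NUM_BYTES_FOR_INTEGER, 'big')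
--         for index, val in enumerate(value_byte_array):
--             if val != 0x00:
--                 return NUM_BYTES_FOR_INTEGER - index, val
--     else:
--         value_byte_array = twos_complement(value, 64).to_bytes(NUM_BYTES_FOR_INTEGER, 'little')
--         for index, val in enumerate(value_byte_array):
--             if val & 0x80:
--                 return index+1, val
-- ===== SOURCE B (Python) =====
-- def find_num_bytes_and_msb(value):
--     if value == 0:
--         return 1, 0x00
--     if value == -1:
--         return 1, 0xff
--     if value > 0:
--         nbytes = (value.bit_length() + 7) // 8
--         return nbytes, (value >> (8 * (nbytes - 1))) & 0xFF
--     # negative: the answer byte is the lowest one whose sign bit is set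
--     w = value & 0xFFFFFFFFFFFFFFFF
--     sign_bits = w & 0x8080808080808080
--     nbytes = (sign_bits & -sign_bits).bit_length() // 8
--     return nbytes, (w >> (8 * (nbytes - 1))) & 0xFF
-- ===== Notes on version B (the rewrite author's own statement) =====
-- stated objective: simpler
-- what changed: B drops the twos_complement helper and the fixed-size to_bytes byte arrays with their enumerate scans: for positive values a closed form from bit_length gives the byte count and one shift gives the msb; for negative values the lowest sign-bit byte is found by masking all sign bits at once and isolating the lowest set bit, again closed form.
import Mathlib
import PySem

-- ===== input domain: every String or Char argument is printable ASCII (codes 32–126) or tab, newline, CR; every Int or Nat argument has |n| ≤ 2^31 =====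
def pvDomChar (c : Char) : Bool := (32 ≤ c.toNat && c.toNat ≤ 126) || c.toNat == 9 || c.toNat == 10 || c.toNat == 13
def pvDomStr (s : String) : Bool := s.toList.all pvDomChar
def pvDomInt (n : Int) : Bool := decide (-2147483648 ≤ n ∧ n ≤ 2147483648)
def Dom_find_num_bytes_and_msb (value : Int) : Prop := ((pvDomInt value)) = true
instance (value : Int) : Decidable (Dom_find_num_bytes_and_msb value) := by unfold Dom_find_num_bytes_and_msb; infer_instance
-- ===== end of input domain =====

-- B replaces A's two's-complement byte array and enumerate-scans by closed-form bit arithmetic: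
-- byte count from bit_length for positive values, the lowest sign-bit byte isolated from a
-- sign-bit mask for negative ones (objective: simpler).

-- ===== PORT A =====
def twos_complement (value : Int) (nbits : Int) : Int :=
  -- (value + (1 << nbits)) % (1 << nbits); nbits is only ever the literal 64, so 1 << nbits = 2 ^ nbits.toNat (exact for nbits ≥ 0)
  PySem.Int.mod (value + 2 ^ nbits.toNat) (2 ^ nbits.toNat)

-- hand port of int.to_bytes(8, 'big') / (8, 'little') on a nonnegative value < 2^256:
-- byte at big-endian index i is (w / 2^(8*(7-i))) % 256; little-endian index i is (w / 2^(8*i)) % 256 (exact)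
def toBytesBE (w : Nat) : List Nat := (List.range 8).map (fun i => w / 2 ^ (8 * (7 - i)) % 256)
def toBytesLE (w : Nat) : List Nat := (List.range 8).map (fun i => w / 2 ^ (8 * i) % 256)

-- 'for index, val in enumerate(...): if val != 0: return (8 - index, val)'; [] ⇒ Python returns None ⇒ sentinel (0,0)
def scanBE : List Nat → Nat → Int × Int
  | [], _ => (0, 0)
  | v :: rest, index => if v ≠ 0 then ((8 : Int) - (index : Int), (v : Int)) else scanBE rest (index + 1)

-- 'for index, val in enumerate(...): if val & 0x80: return (index + 1, val)'
def scanLE : List Nat → Nat → Int × Int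
  | [], _ => (0, 0)
  | v :: rest, index => if v &&& 128 ≠ 0 then ((index : Int) + 1, (v : Int)) else scanLE rest (index + 1)

def find_num_bytes_and_msb (value : Int) : Int × Int :=
  if value = 0 then (1, 0x00)
  else if value = -1 then (1, 0xff)
  else if value > 0 then
    -- twos_complement … is nonnegative (PySem.Int.mod with positive divisor), so .toNat is exact
    scanBE (toBytesBE (twos_complement value 64).toNat) 0
  else
    scanLE (toBytesLE (twos_complement value 64).toNat) 0

-- ===== PORT B =====
def find_num_bytes_and_msb_alt (value : Int) : Int × Int :=
  if value = 0 then (1, 0x00)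
  else if value = -1 then (1, 0xff)
  else if value > 0 then
    let nbytes : Nat := (PySem.Int.bitLength value + 7) / 8
    ((nbytes : Int), PySem.Int.band (value >>> (8 * (nbytes - 1))) 255)
  else
    let w : Int := PySem.Int.band value 0xFFFFFFFFFFFFFFFF
    let sign_bits : Int := PySem.Int.band w 0x8080808080808080
    let nbytes : Nat := PySem.Int.bitLength (PySem.Int.band sign_bits (-sign_bits)) / 8
    ((nbytes : Int), PySem.Int.band (w >>> (8 * (nbytes - 1))) 255)

-- ===== PRECONDITION & SPEC =====
def Spec_find_num_bytes_and_msb (value : Int) (out : Int × Int) : Prop := out = find_num_bytes_and_msb_alt value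
instance (value : Int) (out : Int × Int) : Decidable (Spec_find_num_bytes_and_msb value out) := by unfold Spec_find_num_bytes_and_msb; infer_instance

-- ===== CLAIM (what is proved, stated in full; the proofs are below) =====
def Claim_equal_find_num_bytes_and_msb : Prop := ∀ (value : Int), Dom_find_num_bytes_and_msb value → Spec_find_num_bytes_and_msb value (find_num_bytes_and_msb value)

-- ===== LEMMAS AND PROOFS =====

theorem and255 (m : Nat) : m &&& 255 = m % 256 := by
  simpa using Nat.and_two_pow_sub_one_eq_mod m 8

theorem bl_bracket (n lo hi : Nat) (h1 : 2 ^ lo ≤ n) (h2 : n < 2 ^ hi) :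
    lo < PySem.Int.bitLength (n : Int) ∧ PySem.Int.bitLength (n : Int) ≤ hi := by
  have hpow : 1 ≤ 2 ^ lo := Nat.one_le_two_pow
  have hn0 : ((n : Int)) ≠ 0 := by exact_mod_cast (by omega : (n : Nat) ≠ 0)
  have ha : n < 2 ^ PySem.Int.bitLength (n : Int) := by
    simpa using PySem.Int.lt_two_pow_bitLength (n : Int)
  have hb2 : 2 ^ (PySem.Int.bitLength (n : Int) - 1) ≤ n := by
    simpa using PySem.Int.two_pow_bitLength_le (n : Int) hn0
  constructor
  · by_contra h
    push Not at h
    have hc : (2 : Nat) ^ PySem.Int.bitLength (n : Int) ≤ 2 ^ lo :=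
      Nat.pow_le_pow_right (by norm_num) h
    omega
  · by_contra h
    push Not at h
    have hc : (2 : Nat) ^ hi ≤ 2 ^ (PySem.Int.bitLength (n : Int) - 1) :=
      Nat.pow_le_pow_right (by norm_num) (by omega)
    omega

theorem pos_branch (n : Nat) (h1 : 1 ≤ n) (h2 : n ≤ 2 ^ 31) :
    scanBE (toBytesBE n) 0 =
      ((( (PySem.Int.bitLength (n : Int) + 7) / 8 : Nat) : Int),
       (((n >>> (8 * (((PySem.Int.bitLength (n : Int) + 7) / 8 : Nat) - 1))) &&& 255 : Nat) : Int)) := by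
  have hr : List.range 8 = [0, 1, 2, 3, 4, 5, 6, 7] := rfl
  set bl := PySem.Int.bitLength (n : Int) with hbl
  by_cases hc1 : n < 2 ^ 8
  · obtain ⟨hl, hu⟩ := bl_bracket n 0 8 (by omega) (by omega)
    have hnb : (bl + 7) / 8 = 1 := by omega
    rw [hnb]
    norm_num [toBytesBE, hr, scanBE, and255, Nat.shiftRight_eq_div_pow]
    split_ifs <;> first | rfl | (exfalso; omega)
  by_cases hc2 : n < 2 ^ 16
  · obtain ⟨hl, hu⟩ := bl_bracket n 8 16 (by omega) (by omega)
    have hnb : (bl + 7) / 8 = 2 := by omega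
    rw [hnb]
    norm_num [toBytesBE, hr, scanBE, and255, Nat.shiftRight_eq_div_pow]
    split_ifs <;> first | rfl | (exfalso; omega)
  by_cases hc3 : n < 2 ^ 24
  · obtain ⟨hl, hu⟩ := bl_bracket n 16 24 (by omega) (by omega)
    have hnb : (bl + 7) / 8 = 3 := by omega
    rw [hnb]
    norm_num [toBytesBE, hr, scanBE, and255, Nat.shiftRight_eq_div_pow]
    split_ifs <;> first | rfl | (exfalso; omega)
  · obtain ⟨hl, hu⟩ := bl_bracket n 24 32 (by omega) (by omega)
    have hnb : (bl + 7) / 8 = 4 := by omega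
    rw [hnb]
    norm_num [toBytesBE, hr, scanBE, and255, Nat.shiftRight_eq_div_pow]
    split_ifs <;> first | rfl | (exfalso; omega)

theorem Acond (x : Nat) : (x % 256 &&& 128 ≠ 0) ↔ (x / 128 % 2 = 1) := by
  have e1 : x % 256 &&& 128 = ((x % 256).testBit 7).toNat * 128 := by
    simpa using Nat.and_two_pow (x % 256) 7
  have e2 : (x % 256).testBit 7 = decide (x % 256 / 2 ^ 7 % 2 = 1) := Nat.testBit_eq_decide_div_mod_eq ..
  rw [e1, e2]
  rcases Nat.decEq (x % 256 / 2 ^ 7 % 2) 1 with h | h <;> simp [*] <;> omega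

-- byte-level splitting of a bitwise AND
theorem land_byte_split (a b c d : Nat) (ha : a < 2 ^ 8) (hc : c < 2 ^ 8) :
    (2 ^ 8 * b + a) &&& (2 ^ 8 * d + c) = 2 ^ 8 * (b &&& d) + (a &&& c) := by
  apply Nat.eq_of_testBit_eq
  intro i
  rw [Nat.testBit_and, Nat.testBit_two_pow_mul_add b ha, Nat.testBit_two_pow_mul_add d hc,
      Nat.testBit_two_pow_mul_add (b &&& d) (Nat.and_lt_two_pow _ (by omega)), Nat.testBit_and,
      Nat.testBit_and]
  by_cases h : i < 8 <;> simp [h]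

theorem and128 (y : Nat) : y &&& 128 = y / 128 % 2 * 128 := by
  have e1 : y &&& 128 = (y.testBit 7).toNat * 128 := by simpa using Nat.and_two_pow y 7
  have e2 : y.testBit 7 = decide (y / 2 ^ 7 % 2 = 1) := Nat.testBit_eq_decide_div_mod_eq ..
  have e3 : (2 : Nat) ^ 7 = 128 := rfl
  rcases Nat.mod_two_eq_zero_or_one (y / 128) with h | h <;> simp [e1, e2, e3, h]

-- one byte level of the masking: x & (2^8*M + 0x80) = 2^8*(x/2^8 & M) + sign bit of x's low byte
theorem mask_step (x M : Nat) :
    x &&& (2 ^ 8 * M + 128) = 2 ^ 8 * (x / 2 ^ 8 &&& M) + x / 128 % 2 * 128 := by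
  have h := land_byte_split (x % 2 ^ 8) (x / 2 ^ 8) 128 M (Nat.mod_lt _ (by norm_num)) (by norm_num)
  have hx : 2 ^ 8 * (x / 2 ^ 8) + x % 2 ^ 8 = x := Nat.div_add_mod x (2 ^ 8)
  have h128 : x % 2 ^ 8 &&& 128 = x / 128 % 2 * 128 := by
    rw [and128]
    have : x % 2 ^ 8 / 128 % 2 = x / 128 % 2 := by omega
    rw [this]
  calc x &&& (2 ^ 8 * M + 128) = (2 ^ 8 * (x / 2 ^ 8) + x % 2 ^ 8) &&& (2 ^ 8 * M + 128) := by rw [hx]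
    _ = 2 ^ 8 * (x / 2 ^ 8 &&& M) + (x % 2 ^ 8 &&& 128) := h
    _ = 2 ^ 8 * (x / 2 ^ 8 &&& M) + x / 128 % 2 * 128 := by rw [h128]

-- the mask picks exactly the eight sign bits of w
theorem maskW (w : Nat) :
    w &&& 0x8080808080808080 =
      w / 2 ^ 7 % 2 * 2 ^ 7 + w / 2 ^ 15 % 2 * 2 ^ 15 + w / 2 ^ 23 % 2 * 2 ^ 23 +
      w / 2 ^ 31 % 2 * 2 ^ 31 + w / 2 ^ 39 % 2 * 2 ^ 39 + w / 2 ^ 47 % 2 * 2 ^ 47 +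
      w / 2 ^ 55 % 2 * 2 ^ 55 + w / 2 ^ 63 % 2 * 2 ^ 63 := by
  rw [show (0x8080808080808080 : Nat) = 2 ^ 8 * 0x80808080808080 + 128 from rfl, mask_step,
      show (0x80808080808080 : Nat) = 2 ^ 8 * 0x808080808080 + 128 from rfl, mask_step,
      show (0x808080808080 : Nat) = 2 ^ 8 * 0x8080808080 + 128 from rfl, mask_step,
      show (0x8080808080 : Nat) = 2 ^ 8 * 0x80808080 + 128 from rfl, mask_step,
      show (0x80808080 : Nat) = 2 ^ 8 * 0x808080 + 128 from rfl, mask_step,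
      show (0x808080 : Nat) = 2 ^ 8 * 0x8080 + 128 from rfl, mask_step,
      show (0x8080 : Nat) = 2 ^ 8 * 0x80 + 128 from rfl, mask_step,
      show (0x80 : Nat) = 2 ^ 8 * 0 + 128 from rfl, mask_step]
  norm_num [Nat.div_div_eq_div_mul]
  ring_nf


theorem neg_branch (W : Nat) (h1 : 2 ^ 64 - 2 ^ 31 ≤ W) (h2 : W ≤ 2 ^ 64 - 2) :
    scanLE (toBytesLE W) 0 =
      (((PySem.Int.bitLength (PySem.Int.band (((W &&& 0x8080808080808080 : Nat) : Int))
            (-((W &&& 0x8080808080808080 : Nat) : Int))) / 8 : Nat) : Int),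
       PySem.Int.band ((W : Int) >>>
          ((8 * (PySem.Int.bitLength (PySem.Int.band (((W &&& 0x8080808080808080 : Nat) : Int))
            (-((W &&& 0x8080808080808080 : Nat) : Int))) / 8 - 1)) : Nat)) 255) := by
  have h31 : W / 2147483648 % 2 = 1 := by omega
  have h39 : W / 549755813888 % 2 = 1 := by omega
  have h47 : W / 140737488355328 % 2 = 1 := by omega
  have h55 : W / 36028797018963968 % 2 = 1 := by omega
  have h63 : W / 9223372036854775808 % 2 = 1 := by omega
  have hm := maskW W
  norm_num at hm
  rcases Nat.mod_two_eq_zero_or_one (W / 128) with hb0 | hb0 <;>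
    rcases Nat.mod_two_eq_zero_or_one (W / 32768) with hb1 | hb1 <;>
      rcases Nat.mod_two_eq_zero_or_one (W / 8388608) with hb2 | hb2
  · rw [hb0, hb1, hb2, h31, h39, h47, h55, h63] at hm
    norm_num at hm
    rw [hm]
    rw [show (PySem.Int.bitLength (PySem.Int.band ((9259542123265392640 : Nat) : Int) (-((9259542123265392640 : Nat) : Int))) / 8) = 4 from by decide]
    have hsh : ((W : Int) >>> (8 * (4 - 1) : Nat)) = ((W >>> 24 : Nat) : Int) := by
      rw [← Int.natCast_shiftRight]
    rw [hsh, show (255 : Int) = ((255 : Nat) : Int) from rfl, PySem.Int.band_natCast,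
        and255, Nat.shiftRight_eq_div_pow]
    norm_num [toBytesLE, scanLE, List.range_succ, Acond, Nat.div_div_eq_div_mul, hb0, hb1, hb2, h31]
  · rw [hb0, hb1, hb2, h31, h39, h47, h55, h63] at hm
    norm_num at hm
    rw [hm]
    rw [show (PySem.Int.bitLength (PySem.Int.band ((9259542123273781248 : Nat) : Int) (-((9259542123273781248 : Nat) : Int))) / 8) = 3 from by decide]
    have hsh : ((W : Int) >>> (8 * (3 - 1) : Nat)) = ((W >>> 16 : Nat) : Int) := by
      rw [← Int.natCast_shiftRight]
    rw [hsh, show (255 : Int) = ((255 : Nat) : Int) from rfl, PySem.Int.band_natCast,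
        and255, Nat.shiftRight_eq_div_pow]
    norm_num [toBytesLE, scanLE, List.range_succ, Acond, Nat.div_div_eq_div_mul, hb0, hb1, hb2, h31]
  · rw [hb0, hb1, hb2, h31, h39, h47, h55, h63] at hm
    norm_num at hm
    rw [hm]
    rw [show (PySem.Int.bitLength (PySem.Int.band ((9259542123265425408 : Nat) : Int) (-((9259542123265425408 : Nat) : Int))) / 8) = 2 from by decide]
    have hsh : ((W : Int) >>> (8 * (2 - 1) : Nat)) = ((W >>> 8 : Nat) : Int) := by
      rw [← Int.natCast_shiftRight]
    rw [hsh, show (255 : Int) = ((255 : Nat) : Int) from rfl, PySem.Int.band_natCast,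
        and255, Nat.shiftRight_eq_div_pow]
    norm_num [toBytesLE, scanLE, List.range_succ, Acond, Nat.div_div_eq_div_mul, hb0, hb1, hb2, h31]
  · rw [hb0, hb1, hb2, h31, h39, h47, h55, h63] at hm
    norm_num at hm
    rw [hm]
    rw [show (PySem.Int.bitLength (PySem.Int.band ((9259542123273814016 : Nat) : Int) (-((9259542123273814016 : Nat) : Int))) / 8) = 2 from by decide]
    have hsh : ((W : Int) >>> (8 * (2 - 1) : Nat)) = ((W >>> 8 : Nat) : Int) := by
      rw [← Int.natCast_shiftRight]
    rw [hsh, show (255 : Int) = ((255 : Nat) : Int) from rfl, PySem.Int.band_natCast,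
        and255, Nat.shiftRight_eq_div_pow]
    norm_num [toBytesLE, scanLE, List.range_succ, Acond, Nat.div_div_eq_div_mul, hb0, hb1, hb2, h31]
  · rw [hb0, hb1, hb2, h31, h39, h47, h55, h63] at hm
    norm_num at hm
    rw [hm]
    rw [show (PySem.Int.bitLength (PySem.Int.band ((9259542123265392768 : Nat) : Int) (-((9259542123265392768 : Nat) : Int))) / 8) = 1 from by decide]
    have hsh : ((W : Int) >>> (8 * (1 - 1) : Nat)) = ((W >>> 0 : Nat) : Int) := by
      rw [← Int.natCast_shiftRight]
    rw [hsh, show (255 : Int) = ((255 : Nat) : Int) from rfl, PySem.Int.band_natCast,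
        and255, Nat.shiftRight_eq_div_pow]
    norm_num [toBytesLE, scanLE, List.range_succ, Acond, Nat.div_div_eq_div_mul, hb0, hb1, hb2, h31]
  · rw [hb0, hb1, hb2, h31, h39, h47, h55, h63] at hm
    norm_num at hm
    rw [hm]
    rw [show (PySem.Int.bitLength (PySem.Int.band ((9259542123273781376 : Nat) : Int) (-((9259542123273781376 : Nat) : Int))) / 8) = 1 from by decide]
    have hsh : ((W : Int) >>> (8 * (1 - 1) : Nat)) = ((W >>> 0 : Nat) : Int) := by
      rw [← Int.natCast_shiftRight]
    rw [hsh, show (255 : Int) = ((255 : Nat) : Int) from rfl, PySem.Int.band_natCast,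
        and255, Nat.shiftRight_eq_div_pow]
    norm_num [toBytesLE, scanLE, List.range_succ, Acond, Nat.div_div_eq_div_mul, hb0, hb1, hb2, h31]
  · rw [hb0, hb1, hb2, h31, h39, h47, h55, h63] at hm
    norm_num at hm
    rw [hm]
    rw [show (PySem.Int.bitLength (PySem.Int.band ((9259542123265425536 : Nat) : Int) (-((9259542123265425536 : Nat) : Int))) / 8) = 1 from by decide]
    have hsh : ((W : Int) >>> (8 * (1 - 1) : Nat)) = ((W >>> 0 : Nat) : Int) := by
      rw [← Int.natCast_shiftRight]
    rw [hsh, show (255 : Int) = ((255 : Nat) : Int) from rfl, PySem.Int.band_natCast,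
        and255, Nat.shiftRight_eq_div_pow]
    norm_num [toBytesLE, scanLE, List.range_succ, Acond, Nat.div_div_eq_div_mul, hb0, hb1, hb2, h31]
  · rw [hb0, hb1, hb2, h31, h39, h47, h55, h63] at hm
    norm_num at hm
    rw [hm]
    rw [show (PySem.Int.bitLength (PySem.Int.band ((9259542123273814144 : Nat) : Int) (-((9259542123273814144 : Nat) : Int))) / 8) = 1 from by decide]
    have hsh : ((W : Int) >>> (8 * (1 - 1) : Nat)) = ((W >>> 0 : Nat) : Int) := by
      rw [← Int.natCast_shiftRight]
    rw [hsh, show (255 : Int) = ((255 : Nat) : Int) from rfl, PySem.Int.band_natCast,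
        and255, Nat.shiftRight_eq_div_pow]
    norm_num [toBytesLE, scanLE, List.range_succ, Acond, Nat.div_div_eq_div_mul, hb0, hb1, hb2, h31]

theorem band_low64 (a : Int) (ha : -2 ^ 31 ≤ a) (ha' : a < 0) :
    PySem.Int.band a 0xFFFFFFFFFFFFFFFF = (((a + 2 ^ 64).toNat : Nat) : Int) := by
  have h1 : ¬ 0 ≤ a := by omega
  rw [PySem.Int.band, if_neg h1, if_pos (by norm_num : (0 : Int) ≤ 0xFFFFFFFFFFFFFFFF)]
  have h2 : (0xFFFFFFFFFFFFFFFF : Int).toNat &&& (-a - 1).toNat = (-a - 1).toNat := by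
    have h3 := Nat.and_two_pow_sub_one_eq_mod (-a - 1).toNat 64
    rw [Nat.and_comm, show ((0xFFFFFFFFFFFFFFFF : Int).toNat) = 2 ^ 64 - 1 from rfl, h3]
    omega
  rw [h2]
  omega

-- ===== VERDICT (by name: the statement is the Claim_ definition above) =====
theorem find_num_bytes_and_msb_spec : Claim_equal_find_num_bytes_and_msb := by
  intro value hdom
  have hb : (-2147483648 : Int) ≤ value ∧ value ≤ 2147483648 := by
    simpa [Dom_find_num_bytes_and_msb, pvDomInt] using hdom
  unfold Spec_find_num_bytes_and_msb find_num_bytes_and_msb find_num_bytes_and_msb_alt twos_complement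
  by_cases h0 : value = 0
  · simp [h0]
  by_cases h1 : value = -1
  · simp [h1]
  rw [PySem.Int.mod_eq_emod_of_pos (by norm_num)]
  have h64 : ((64 : Int)).toNat = 64 := rfl
  rw [h64]
  by_cases hp : value > 0
  · have hA : (value + 2 ^ 64) % 2 ^ 64 = value := by omega
    rw [hA]
    simp only [h0, h1, hp, if_false, if_true]
    have hv : value = ((value.toNat : Nat) : Int) := by omega
    rw [hv, Int.toNat_natCast, pos_branch value.toNat (by omega) (by omega), ← Int.natCast_shiftRight,
        show (255 : Int) = ((255 : Nat) : Int) from rfl, PySem.Int.band_natCast]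
  · have hA : (value + 2 ^ 64) % 2 ^ 64 = value + 2 ^ 64 := by omega
    rw [hA]
    simp only [h0, h1, hp, if_false]
    rw [band_low64 value (by omega) (by omega),
        show (0x8080808080808080 : Int) = ((0x8080808080808080 : Nat) : Int) from rfl,
        PySem.Int.band_natCast]
    exact neg_branch (value + 2 ^ 64).toNat (by omega) (by omega)
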